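-- pv_equiv track=rewrite | github.com/AmZu1212/ANIDS-VLSI-PROJECT | Verification/scripts/anids_reference_model.py | output_neuron_result
-- ===== SOURCE A (Python) =====
-- Q07_WIDTH = 8
--
-- OL_ACC_WIDTH = 15
--
-- def wrap_unsigned(value: int, bits: int) -> int:
--     return value & ((1 << bits) - 1)
--
-- def to_signed(value: int, bits: int) -> int:
--     value = wrap_unsigned(value, bits)
--     sign_bit = 1 << (bits - 1)
--     return value - (1 << bits) if value & sign_bit else value
--
-- def wrap_signed(value: int, bits: int) -> int:
--     return to_signed(value, bits)
--
-- def trunc_slice_signed(value: int, in_bits: int, msb: int, width: int) -> int: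
--     raw = wrap_unsigned(value, in_bits)
--     lsb = msb - width + 1
--     sliced = (raw >> lsb) & ((1 << width) - 1)
--     return to_signed(sliced, width)
--
-- def saturating_add_q07(lhs: int, rhs: int) -> int:
--     total = lhs + rhs
--     if total > 127:
--         return 127
--     if total < -128:
--         return -128
--     return total
--
-- def output_neuron_result(hidden_results: list[int], weights: list[int], bias: int, n: int) -> int:
--     acc = 0
--     last_step_index = (n >> 1) - 1
--     for counter in range(last_step_index + 1):
--         product_full = wrap_signed(hidden_results[counter] * weights[counter], 16)
--         product_q07 = trunc_slice_signed(product_full, 16, 14, 8)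
--         acc_next = wrap_signed(acc + product_q07, OL_ACC_WIDTH)
--         if counter == last_step_index:
--             trunc8 = trunc_slice_signed(acc_next, OL_ACC_WIDTH, OL_ACC_WIDTH - 1, Q07_WIDTH)
--             return saturating_add_q07(trunc8, bias)
--         acc = acc_next
--     raise RuntimeError("output_neuron_result: empty loop")
-- ===== SOURCE B (Python) =====
-- Q07_WIDTH = 8
--
-- OL_ACC_WIDTH = 15
--
-- def wrap_unsigned(value: int, bits: int) -> int:
--     return value & ((1 << bits) - 1)
--
-- def to_signed(value: int, bits: int) -> int:
--     value = wrap_unsigned(value, bits)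
--     sign_bit = 1 << (bits - 1)
--     return value - (1 << bits) if value & sign_bit else value
--
-- def wrap_signed(value: int, bits: int) -> int:
--     return to_signed(value, bits)
--
-- def trunc_slice_signed(value: int, in_bits: int, msb: int, width: int) -> int:
--     raw = wrap_unsigned(value, in_bits)
--     lsb = msb - width + 1
--     sliced = (raw >> lsb) & ((1 << width) - 1)
--     return to_signed(sliced, width)
--
-- def saturating_add_q07(lhs: int, rhs: int) -> int:
--     total = lhs + rhs
--     if total > 127:
--         return 127
--     if total < -128:
--         return -128
--     return total
--
-- def output_neuron_result(hidden_results: list[int], weights: list[int], bias: int, n: int) -> int: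
--     steps = n >> 1
--     if steps < 1:
--         raise RuntimeError("output_neuron_result: empty loop")
--     # accumulate-then-finalize: per-step 15-bit wrapping of the accumulator is
--     # invisible to the final truncation (it reads the accumulator mod 2**15),
--     # so one plain integer sum of the quantized products suffices.
--     products = [
--         trunc_slice_signed(wrap_signed(h * w, 16), 16, 14, 8)
--         for h, w in zip(hidden_results[:steps], weights[:steps])
--     ]
--     trunc8 = trunc_slice_signed(sum(products), OL_ACC_WIDTH, OL_ACC_WIDTH - 1, Q07_WIDTH)
--     return saturating_add_q07(trunc8, bias)
-- ===== Notes on version B (the rewrite author's own statement) =====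
-- stated objective: simpler
-- what changed: A interleaves a per-iteration last-index check and early return with 15-bit wrapping of the accumulator on every step; B guards the empty case once, takes a plain Python sum of the quantized products over zipped slices (no per-step wrapping, no in-loop branch), and applies the truncation/saturation finalization once, relying on the fact that the final truncation only reads the accumulator mod 2^15.
import Mathlib
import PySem

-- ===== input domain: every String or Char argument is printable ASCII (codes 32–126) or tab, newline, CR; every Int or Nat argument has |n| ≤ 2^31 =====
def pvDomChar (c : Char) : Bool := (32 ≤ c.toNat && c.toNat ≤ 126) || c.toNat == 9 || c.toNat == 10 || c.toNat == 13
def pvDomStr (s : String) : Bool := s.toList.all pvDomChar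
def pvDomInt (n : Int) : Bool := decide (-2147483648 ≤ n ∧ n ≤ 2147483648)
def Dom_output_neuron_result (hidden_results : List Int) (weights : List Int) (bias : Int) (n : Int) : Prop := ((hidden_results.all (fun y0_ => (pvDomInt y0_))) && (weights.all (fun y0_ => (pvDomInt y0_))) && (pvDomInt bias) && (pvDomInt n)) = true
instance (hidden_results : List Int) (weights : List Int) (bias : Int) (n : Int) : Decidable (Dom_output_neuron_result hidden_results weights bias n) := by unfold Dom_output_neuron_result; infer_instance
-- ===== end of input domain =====

-- B replaces A's interleaved loop (per-step 15-bit wrap + in-loop last-index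
-- check + early return) by a plain sum of the quantized products over zipped
-- slices followed by one finalization; objective: simpler.

-- ===== PORT A =====
-- Shared module-level helpers, used verbatim by both Python versions.
-- Bit widths are the module constants 8/15/16, so they are carried as Nat
-- (exact: every call site passes a positive literal, and msb - width + 1 ≥ 0).

def Q07_WIDTH : Nat := 8
def OL_ACC_WIDTH : Nat := 15

def wrap_unsigned (value : Int) (bits : Nat) : Int :=
  PySem.Int.band value ((1 <<< bits) - 1)

def to_signed (value : Int) (bits : Nat) : Int :=
  let v := wrap_unsigned value bits
  let sign_bit : Int := 1 <<< (bits - 1)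
  if PySem.Int.band v sign_bit ≠ 0 then v - (1 <<< bits) else v

def wrap_signed (value : Int) (bits : Nat) : Int :=
  to_signed value bits

def trunc_slice_signed (value : Int) (in_bits msb width : Nat) : Int :=
  let raw := wrap_unsigned value in_bits
  let lsb := msb - width + 1
  let sliced := PySem.Int.band (raw >>> lsb) ((1 <<< width) - 1)
  to_signed sliced width

def saturating_add_q07 (lhs rhs : Int) : Int :=
  let total := lhs + rhs
  if total > 127 then 127
  else if total < -128 then -128
  else total

-- A's for-loop, as structural recursion over range(last_step_index + 1);
-- xs[counter] is pyGet? (IndexError = none, excluded by Pre_, .getD 0 there);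
-- the [] case is Python's RuntimeError, also excluded by Pre_.
def onrLoopA (hidden_results weights : List Int) (bias : Int) (last_step_index : Int)
    (acc : Int) : List Int → Int
  | [] => 0
  | counter :: rest =>
    let product_full := wrap_signed
      (((PySem.List.pyGet? hidden_results counter).getD 0) *
       ((PySem.List.pyGet? weights counter).getD 0)) 16
    let product_q07 := trunc_slice_signed product_full 16 14 8
    let acc_next := wrap_signed (acc + product_q07) OL_ACC_WIDTH
    if counter == last_step_index then
      saturating_add_q07
        (trunc_slice_signed acc_next OL_ACC_WIDTH (OL_ACC_WIDTH - 1) Q07_WIDTH) bias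
    else
      onrLoopA hidden_results weights bias last_step_index acc_next rest

def output_neuron_result (hidden_results : List Int) (weights : List Int) (bias : Int) (n : Int) : Int :=
  let last_step_index := (n >>> (1 : Nat)) - 1
  onrLoopA hidden_results weights bias last_step_index 0
    (PySem.List.pyRange 0 (last_step_index + 1) 1)

-- ===== PORT B =====
def output_neuron_result_alt (hidden_results : List Int) (weights : List Int) (bias : Int) (n : Int) : Int :=
  let steps := n >>> (1 : Nat)
  -- steps < 1 raises RuntimeError in Python B (excluded by Pre_)
  let products :=
    (List.zip (PySem.List.slice hidden_results none (some steps))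
              (PySem.List.slice weights none (some steps))).map
      (fun p => trunc_slice_signed (wrap_signed (p.1 * p.2) 16) 16 14 8)
  let trunc8 := trunc_slice_signed (products.foldl (· + ·) 0)
      OL_ACC_WIDTH (OL_ACC_WIDTH - 1) Q07_WIDTH
  saturating_add_q07 trunc8 bias

-- ===== PRECONDITION & SPEC =====
-- Pre_ excludes exactly the inputs on which Python A raises: n >> 1 < 1
-- (RuntimeError "empty loop") and lists shorter than n >> 1 (IndexError).
def Pre_output_neuron_result (hidden_results : List Int) (weights : List Int) (bias : Int) (n : Int) : Prop :=
  1 ≤ n >>> (1 : Nat) ∧ n >>> (1 : Nat) ≤ (hidden_results.length : Int) ∧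
    n >>> (1 : Nat) ≤ (weights.length : Int)
instance (hidden_results : List Int) (weights : List Int) (bias : Int) (n : Int) : Decidable (Pre_output_neuron_result hidden_results weights bias n) := by unfold Pre_output_neuron_result; infer_instance

def pvWitness_output_neuron_result : List Int × List Int × Int × Int := ([3, -5], [7, 9], 4, 4)

def Spec_output_neuron_result (hidden_results : List Int) (weights : List Int) (bias : Int) (n : Int) (out : Int) : Prop := out = output_neuron_result_alt hidden_results weights bias n
instance (hidden_results : List Int) (weights : List Int) (bias : Int) (n : Int) (out : Int) : Decidable (Spec_output_neuron_result hidden_results weights bias n out) := by unfold Spec_output_neuron_result; infer_instance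

-- ===== CLAIM (what is proved, stated in full; the proofs are below) =====
def Claim_equal_output_neuron_result : Prop := ∀ (hidden_results : List Int) (weights : List Int) (bias : Int) (n : Int), Dom_output_neuron_result hidden_results weights bias n → Pre_output_neuron_result hidden_results weights bias n → Spec_output_neuron_result hidden_results weights bias n (output_neuron_result hidden_results weights bias n)

-- ===== LEMMAS AND PROOFS =====

-- Python's  a & (2^b - 1)  is  a mod 2^b, for every integer a.
theorem band_mask (a : Int) (b : Nat) :
    PySem.Int.band a ((1 <<< b : Int) - 1) = a % (2 ^ b : Int) := by
  have hone : (1:Nat) ≤ 2 ^ b := Nat.one_le_two_pow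
  have hcast : ((1 <<< b : Int) - 1) = ((2 ^ b - 1 : Nat) : Int) := by
    rw [Nat.shiftLeft_eq, one_mul]; omega
  have h2 : ((2:Int) ^ b) = ((2 ^ b : Nat) : Int) := by push_cast; ring
  rw [hcast]
  unfold PySem.Int.band
  by_cases ha : 0 ≤ a
  · rw [if_pos ha, if_pos (by positivity)]
    rw [Int.toNat_natCast, Nat.and_two_pow_sub_one_eq_mod]
    rw [h2, ← Int.toNat_of_nonneg ha]
    exact_mod_cast rfl
  · rw [if_neg ha, if_pos (by positivity)]
    rw [Int.toNat_natCast, Nat.land_comm, Nat.and_two_pow_sub_one_eq_mod]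
    set nn := (-a - 1).toNat with hnn
    have ha' : a = -(nn : Int) - 1 := by omega
    have hlt : nn % 2 ^ b < 2 ^ b := Nat.mod_lt _ (by positivity)
    have hle : nn % 2 ^ b ≤ 2 ^ b - 1 := by omega
    rw [Nat.cast_sub hle, Nat.cast_sub hone]
    have hmod : ((nn : Int)) % 2 ^ b = ((nn % 2 ^ b : Nat) : Int) := by push_cast; ring
    have hdecomp : a = (2 ^ b - 1 - ((nn % 2 ^ b : Nat) : Int)) + 2 ^ b * (-(((nn:Int) / 2 ^ b)) - 1) := by
      have h := Int.mul_ediv_add_emod (nn : Int) (2 ^ b) -- 2^b * (nn / 2^b) + nn % 2^b = nn? check arg order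
      rw [hmod] at h
      linear_combination ha' + h
    calc ((2 ^ b : Nat) : Int) - ((1:Nat):Int) - ((nn % 2 ^ b : Nat) : Int)
        = (2 ^ b - 1 - ((nn % 2 ^ b : Nat) : Int)) := by rw [← h2]; norm_num
      _ = ((2 ^ b - 1 - ((nn % 2 ^ b : Nat) : Int)) + 2 ^ b * (-(((nn:Int) / 2 ^ b)) - 1)) % 2 ^ b := by
            rw [Int.add_mul_emod_self_left]
            refine (Int.emod_eq_of_lt ?_ ?_).symm
            · have : ((nn % 2 ^ b : Nat) : Int) ≤ 2 ^ b - 1 := by rw [h2]; exact_mod_cast hle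
              omega
            · have : (0:Int) ≤ ((nn % 2 ^ b : Nat) : Int) := by positivity
              omega
      _ = a % 2 ^ b := by rw [← hdecomp]

theorem wrap_unsigned_eq (v : Int) (b : Nat) :
    wrap_unsigned v b = v % (2 ^ b : Int) := by
  unfold wrap_unsigned; exact band_mask v b

-- to_signed only re-chooses the representative of the mod-2^15 class.
theorem to_signed_emod15 (x : Int) : to_signed x 15 % 32768 = x % 32768 := by
  unfold to_signed
  simp only [wrap_unsigned_eq]
  norm_num [Nat.shiftLeft_eq]
  split_ifs <;> omega

-- trunc_slice_signed with in_bits = 15 reads its argument mod 2^15 only.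
theorem trunc15_congr (x y : Int) (m w : Nat) (h : x % 32768 = y % 32768) :
    trunc_slice_signed x 15 m w = trunc_slice_signed y 15 m w := by
  unfold trunc_slice_signed
  simp only [wrap_unsigned_eq]
  norm_num
  rw [h]

theorem foldl_add_init (l : List Int) (x : Int) :
    l.foldl (· + ·) x = x + l.foldl (· + ·) 0 := by
  induction l generalizing x with
  | nil => simp
  | cons a t ih => simp only [List.foldl_cons]; rw [ih (x + a), ih (0 + a)]; ring

-- the quantized product at index c, as A computes it
def pvProd (hidden_results weights : List Int) (c : Int) : Int :=
  trunc_slice_signed (wrap_signed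
    (((PySem.List.pyGet? hidden_results c).getD 0) *
     ((PySem.List.pyGet? weights c).getD 0)) 16) 16 14 8

-- characterization of A's loop on a nonempty suffix range(a, k) with last index k-1
theorem onrLoopA_eq (hr w : List Int) (bias : Int) (k : Int) :
    ∀ (a acc : Int), a < k →
      onrLoopA hr w bias (k - 1) acc (PySem.List.pyRange a k 1) =
        saturating_add_q07
          (trunc_slice_signed
            (((PySem.List.pyRange a k 1).map (pvProd hr w)).foldl (· + ·) acc) 15 14 8) bias := by
  suffices H : ∀ (d : Nat) (a acc : Int), (k - a).toNat = d → a < k →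
      onrLoopA hr w bias (k - 1) acc (PySem.List.pyRange a k 1) =
        saturating_add_q07
          (trunc_slice_signed
            (((PySem.List.pyRange a k 1).map (pvProd hr w)).foldl (· + ·) acc) 15 14 8) bias by
    intro a acc h; exact H (k - a).toNat a acc rfl h
  intro d
  induction d with
  | zero => intro a acc hd ha; omega
  | succ d ih =>
    intro a acc hd ha
    rw [PySem.List.pyRange_one_cons ha]
    by_cases hlast : a = k - 1
    · have hrest : PySem.List.pyRange (a + 1) k 1 = [] := by
        rw [PySem.List.pyRange_one]
        have : (k - (a + 1)).toNat = 0 := by omega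
        rw [this]; rfl
      rw [hrest]
      simp only [onrLoopA, List.map_cons, List.map_nil, List.foldl_cons, List.foldl_nil,
        if_pos (show (a == k - 1) = true by simp [hlast])]
      exact congrArg (fun t => saturating_add_q07 t bias)
        (trunc15_congr _ _ 14 8 (to_signed_emod15 (acc + pvProd hr w a)))
    · have hlt : a + 1 < k := by omega
      simp only [onrLoopA, List.map_cons, List.foldl_cons,
        if_neg (show ¬((a == k - 1) = true) by simp [hlast])]
      have hp : trunc_slice_signed (wrap_signed
          ((PySem.List.pyGet? hr a).getD 0 * (PySem.List.pyGet? w a).getD 0) 16) 16 14 8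
          = pvProd hr w a := rfl
      rw [hp, ih (a + 1) (wrap_signed (acc + pvProd hr w a) OL_ACC_WIDTH) (by omega) hlt]
      refine congrArg (fun t => saturating_add_q07 t bias) ?_
      rw [foldl_add_init _ (wrap_signed (acc + pvProd hr w a) OL_ACC_WIDTH),
        foldl_add_init _ (acc + pvProd hr w a)]
      refine trunc15_congr _ _ 14 8 ?_
      have := to_signed_emod15 (acc + pvProd hr w a)
      unfold wrap_signed OL_ACC_WIDTH
      omega

-- B's product list equals A's products over range(0, k)
theorem products_eq (hr w : List Int) (k : Int) (h1 : 0 ≤ k)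
    (h2 : k ≤ (hr.length : Int)) (h3 : k ≤ (w.length : Int)) :
    (List.zip (PySem.List.slice hr none (some k)) (PySem.List.slice w none (some k))).map
        (fun p => trunc_slice_signed (wrap_signed (p.1 * p.2) 16) 16 14 8) =
      (PySem.List.pyRange 0 k 1).map (pvProd hr w) := by
  rw [PySem.List.slice_to hr h1, PySem.List.slice_to w h1, PySem.List.pyRange_one]
  have hk1 : k.toNat ≤ hr.length := by omega
  have hk2 : k.toNat ≤ w.length := by omega
  apply List.ext_getElem
  · simp; omega
  · intro i hi1 hi2
    simp only [List.getElem_map, List.getElem_zip, List.getElem_take, List.getElem_range]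
    have hilen : i < k.toNat := by simpa using hi2
    unfold pvProd
    rw [zero_add, PySem.List.pyGet?_natCast, PySem.List.pyGet?_natCast,
      List.getElem?_eq_getElem (by omega), List.getElem?_eq_getElem (by omega)]
    rfl

-- ===== VERDICT (by name: the statement is the Claim_ definition above) =====
theorem output_neuron_result_spec : Claim_equal_output_neuron_result := by
  intro hr w bias n _ hpre
  obtain ⟨h1, h2, h3⟩ := hpre
  unfold Spec_output_neuron_result output_neuron_result output_neuron_result_alt
  simp only []
  rw [show n >>> (1 : Nat) - 1 + 1 = n >>> (1 : Nat) by ring]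
  rw [onrLoopA_eq hr w bias (n >>> (1 : Nat)) 0 0 (by omega)]
  rw [← products_eq hr w (n >>> (1 : Nat)) (by omega) h2 h3]
  rfl
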